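-- pv_equiv track=rewrite | github.com/bkiran0745/Code_for_comp | P-3.py | FindNumberOfSuperiorElements
-- ===== SOURCE A (Python) =====
-- def FindNumberOfSuperiorElements(arr,n):
--     maxi = -1
--     count = 0
--     for i in range(len(arr)-1,-1,-1):
--         if maxi < arr[i]:
--             count+=1
--             maxi = arr[i]
--     return count
-- ===== SOURCE B (Python) =====
-- def FindNumberOfSuperiorElements(arr, n):
--     # suffix-max table: sufmax[i] = max of -1 and all elements strictly right of i
--     sufmax = [0] * len(arr)
--     run = -1
--     for i in range(len(arr) - 1, -1, -1):
--         sufmax[i] = run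
--         if arr[i] > run:
--             run = arr[i]
--     return sum(1 for x, m in zip(arr, sufmax) if x > m)
-- ===== Notes on version B (the rewrite author's own statement) =====
-- stated objective: alternative
-- what changed: Replaces A's single backward pass that tallies new running maxima in-loop with a precomputed suffix-maximum table followed by a separate counting pass comparing arr[i] against sufmax[i].
import Mathlib
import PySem

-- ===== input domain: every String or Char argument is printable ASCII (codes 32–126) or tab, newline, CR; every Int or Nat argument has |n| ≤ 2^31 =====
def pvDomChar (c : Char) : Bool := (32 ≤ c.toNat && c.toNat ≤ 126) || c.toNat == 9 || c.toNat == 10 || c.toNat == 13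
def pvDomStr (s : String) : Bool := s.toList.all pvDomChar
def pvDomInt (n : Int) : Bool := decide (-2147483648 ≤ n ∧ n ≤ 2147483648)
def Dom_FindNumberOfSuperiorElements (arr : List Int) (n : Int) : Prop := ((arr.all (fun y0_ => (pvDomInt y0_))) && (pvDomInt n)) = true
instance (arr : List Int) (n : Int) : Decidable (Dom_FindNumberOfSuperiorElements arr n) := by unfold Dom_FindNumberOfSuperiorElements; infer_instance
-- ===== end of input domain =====

-- B replaces A's in-loop tally of new running maxima by a suffix-maximum table plus a
-- separate counting pass (alternative decomposition, same O(n) cost).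

-- ===== PORT A =====
-- A walks i from len-1 down to 0 carrying (maxi, count); iterating arr.reverse is that
-- same backward traversal, state and branch unchanged.
def FindNumberOfSuperiorElements (arr : List Int) (n : Int) : Int :=
  let s := arr.reverse.foldl
    (fun (st : Int × Int) (x : Int) => if st.1 < x then (x, st.2 + 1) else st)
    (-1, 0)
  s.2

-- ===== PORT B =====
-- builds (running max seeded at -1, suffix-max table) from the right, then counts.
def pvSufMax : List Int → Int × List Int
  | [] => (-1, [])
  | x :: xs =>
      let p := pvSufMax xs
      (if x > p.1 then x else p.1, p.1 :: p.2)

def FindNumberOfSuperiorElements_alt (arr : List Int) (n : Int) : Int :=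
  let sufmax := (pvSufMax arr).2
  ((arr.zip sufmax).filter (fun p => p.1 > p.2)).length

-- ===== PRECONDITION & SPEC =====
def Spec_FindNumberOfSuperiorElements (arr : List Int) (n : Int) (out : Int) : Prop := out = FindNumberOfSuperiorElements_alt arr n
instance (arr : List Int) (n : Int) (out : Int) : Decidable (Spec_FindNumberOfSuperiorElements arr n out) := by unfold Spec_FindNumberOfSuperiorElements; infer_instance

-- ===== CLAIM (what is proved, stated in full; the proofs are below) =====
def Claim_equal_FindNumberOfSuperiorElements : Prop := ∀ (arr : List Int) (n : Int), Dom_FindNumberOfSuperiorElements arr n → Spec_FindNumberOfSuperiorElements arr n (FindNumberOfSuperiorElements arr n)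

-- ===== LEMMAS AND PROOFS =====
-- A's backward fold (foldl over arr.reverse = foldr over arr), characterized
-- structurally: it equals (B's running suffix max, B's count).
theorem pv_fold_eq (arr : List Int) :
    List.foldr (fun (x : Int) (st : Int × Int) => if st.1 < x then (x, st.2 + 1) else st)
      (-1, 0) arr
    = ((pvSufMax arr).1,
       (((arr.zip (pvSufMax arr).2).filter (fun p => p.1 > p.2)).length : Int)) := by
  induction arr with
  | nil => simp [pvSufMax]
  | cons x xs ih =>
      simp only [List.foldr_cons, ih, pvSufMax, List.zip_cons_cons, List.filter_cons]
      by_cases h : (pvSufMax xs).1 < x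
      · simp [h]
      · simp [h]

-- ===== VERDICT (by name: the statement is the Claim_ definition above) =====
theorem FindNumberOfSuperiorElements_spec : Claim_equal_FindNumberOfSuperiorElements := by
  intro arr n _
  unfold Spec_FindNumberOfSuperiorElements FindNumberOfSuperiorElements FindNumberOfSuperiorElements_alt
  simp only [List.foldl_reverse]
  rw [pv_fold_eq]
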